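-- pv_equiv track=rewrite | github.com/allanRoberto/revesbot-final | apps/signals/patterns/puxados_core.py | build_prediction_from_history
-- ===== SOURCE A (Python) =====
-- from typing import List, Dict, Tuple, Optional
-- from collections import Counter, defaultdict
--
-- def build_prediction_from_history(
--     history_seq: List[int],
--     target: int,
--     window: int,
--     top_window: int,
--     top_plus1: int,
-- ) -> Tuple[List[int], Counter, Counter]:
--     """
--     Monta a sugestao usando:
--     - top_window da janela (+1..+window)
--     - top_plus1 do +1 direto
--     """
--     plus1 = Counter()
--     win = Counter()
--
--     for i, n in enumerate(history_seq):
--         if n != target: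
--             continue
--         after = history_seq[i + 1:i + 1 + window]
--         if after:
--             plus1[after[0]] += 1
--         for x in after:
--             win[x] += 1
--
--     suggestion: List[int] = []
--     for n, _ in win.most_common(top_window):
--         if n not in suggestion:
--             suggestion.append(n)
--     for n, _ in plus1.most_common(top_plus1):
--         if n not in suggestion:
--             suggestion.append(n)
--
--     return suggestion, win, plus1
-- ===== SOURCE B (Python) =====
-- def build_prediction_from_history(history_seq, target, window, top_window, top_plus1):
--     """Prefix sums of target occurrences give, for each position j,
--     how many target-windows cover it; one forward pass builds both counters."""
--     n = len(history_seq)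
--     win = {}
--     plus1 = {}
--     if window > 0:
--         prefix = [0]  # prefix[j] = number of targets among history_seq[:j]
--         for v in history_seq:
--             prefix.append(prefix[-1] + (1 if v == target else 0))
--         for j in range(1, n):
--             active = prefix[j] - prefix[max(0, j - window)]
--             if active:
--                 v = history_seq[j]
--                 win[v] = win.get(v, 0) + active
--             if history_seq[j - 1] == target:
--                 w = history_seq[j]
--                 plus1[w] = plus1.get(w, 0) + 1
--
--     def top(counts, k):
--         if k <= 0:
--             return []
--         return sorted(counts.items(), key=lambda kv: kv[1], reverse=True)[:k]
--
--     suggestion = []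
--     seen = set()
--     for v, _ in top(win, top_window) + top(plus1, top_plus1):
--         if v not in seen:
--             seen.add(v)
--             suggestion.append(v)
--
--     return suggestion, win, plus1
-- ===== Notes on version B (the rewrite author's own statement) =====
-- stated objective: alternative
-- what changed: Instead of slicing out a window after every target occurrence and bumping counters element by element, B builds a prefix-sum of target occurrences and makes one forward pass, adding per position the number of target-windows covering it; the suggestion dedup uses a seen-set instead of list membership.
-- outside the precondition, e.g. on build_prediction_from_history([2, 3, -3], 2, -2, 6, 4): A returns ([3], {3: 1}, {3: 1}), B returns ([], {}, {})
import Mathlib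
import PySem

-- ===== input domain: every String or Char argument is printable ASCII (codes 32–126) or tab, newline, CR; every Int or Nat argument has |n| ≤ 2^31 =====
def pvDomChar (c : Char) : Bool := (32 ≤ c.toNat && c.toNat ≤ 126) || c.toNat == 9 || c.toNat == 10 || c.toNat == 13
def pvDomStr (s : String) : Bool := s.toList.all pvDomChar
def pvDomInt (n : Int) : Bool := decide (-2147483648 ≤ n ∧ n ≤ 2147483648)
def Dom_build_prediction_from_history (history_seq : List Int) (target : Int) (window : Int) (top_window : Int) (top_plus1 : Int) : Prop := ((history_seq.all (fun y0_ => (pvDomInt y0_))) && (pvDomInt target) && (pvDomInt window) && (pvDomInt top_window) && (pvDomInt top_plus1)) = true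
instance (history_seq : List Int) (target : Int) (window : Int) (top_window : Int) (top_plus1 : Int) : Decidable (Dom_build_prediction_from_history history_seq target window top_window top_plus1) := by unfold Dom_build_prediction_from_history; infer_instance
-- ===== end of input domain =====

-- B replaces A's per-occurrence window slicing by a prefix-sum of target occurrences and a
-- single forward pass that adds, per position, the number of target-windows covering it.


-- ===== PORT A =====
-- Counter.most_common(n) = heapq.nlargest(n, items, key=count); per the heapq docs this is
-- sorted(items, key=count, reverse=True)[:n], and [] for n ≤ 0 (exact).
def pvMostCommon (d : PySem.Dict Int Int) (n : Int) : List (Int × Int) :=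
  if n ≤ 0 then [] else (PySem.List.sorted d.items (fun p => p.2) true).take n.toNat

def pvAplus1step (history_seq : List Int) (target : Int) (window : Int)
    (d : PySem.Dict Int Int) (p : Int × Int) : PySem.Dict Int Int :=
  if p.2 ≠ target then d else
  match PySem.List.slice history_seq (some (p.1 + 1)) (some (p.1 + 1 + window)) with
  | [] => d
  | a :: _ => d.modify a 0 (· + 1)

def pvAwinstep (history_seq : List Int) (target : Int) (window : Int)
    (d : PySem.Dict Int Int) (p : Int × Int) : PySem.Dict Int Int :=
  if p.2 ≠ target then d else
  (PySem.List.slice history_seq (some (p.1 + 1)) (some (p.1 + 1 + window))).foldl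
    (fun d x => d.modify x 0 (· + 1)) d

def build_prediction_from_history (history_seq : List Int) (target : Int) (window : Int) (top_window : Int) (top_plus1 : Int) : List Int × (List (Int × Int)) × (List (Int × Int)) :=
  -- for i, n in enumerate(history_seq): if n != target: continue; after = history_seq[i+1:i+1+window];
  -- if after: plus1[after[0]] += 1;  for x in after: win[x] += 1
  let st := (PySem.List.enumerate history_seq 0).foldl
    (fun (st : PySem.Dict Int Int × PySem.Dict Int Int) (p : Int × Int) =>
      (pvAplus1step history_seq target window st.1 p, pvAwinstep history_seq target window st.2 p))
    (PySem.Dict.empty, PySem.Dict.empty)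
  let plus1 := st.1
  let win := st.2
  let suggestion := (pvMostCommon win top_window).foldl
    (fun acc p => if acc.contains p.1 then acc else acc ++ [p.1]) []
  let suggestion := (pvMostCommon plus1 top_plus1).foldl
    (fun acc p => if acc.contains p.1 then acc else acc ++ [p.1]) suggestion
  (suggestion, win.items, plus1.items)

-- ===== PORT B =====
def pvTop (d : PySem.Dict Int Int) (k : Int) : List (Int × Int) :=
  if k ≤ 0 then [] else (PySem.List.sorted d.items (fun p => p.2) true).take k.toNat

def pvBwinstep (history_seq prefx : List Int) (target : Int) (window : Int)
    (d : PySem.Dict Int Int) (j : Int) : PySem.Dict Int Int :=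
  let active := PySem.List.pyGetD prefx j 0 - PySem.List.pyGetD prefx (max 0 (j - window)) 0
  if active ≠ 0 then
    d.insert (PySem.List.pyGetD history_seq j 0) (d.getD (PySem.List.pyGetD history_seq j 0) 0 + active)
  else d

def pvBplus1step (history_seq : List Int) (target : Int)
    (d : PySem.Dict Int Int) (j : Int) : PySem.Dict Int Int :=
  if PySem.List.pyGetD history_seq (j - 1) 0 = target then
    d.insert (PySem.List.pyGetD history_seq j 0) (d.getD (PySem.List.pyGetD history_seq j 0) 0 + 1)
  else d

def build_prediction_from_history_alt (history_seq : List Int) (target : Int) (window : Int) (top_window : Int) (top_plus1 : Int) : List Int × (List (Int × Int)) × (List (Int × Int)) :=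
  let n : Int := PySem.List.len history_seq
  let wp : PySem.Dict Int Int × PySem.Dict Int Int :=
    if window > 0 then
      -- prefix[j] = number of targets among history_seq[:j]
      let prefx := history_seq.foldl
        (fun acc v => acc ++ [PySem.List.pyGetD acc (-1) 0 + (if v = target then 1 else 0)])
        [(0 : Int)]
      (PySem.List.pyRange 1 n 1).foldl
        (fun (st : PySem.Dict Int Int × PySem.Dict Int Int) (j : Int) =>
          (pvBwinstep history_seq prefx target window st.1 j, pvBplus1step history_seq target st.2 j))
        (PySem.Dict.empty, PySem.Dict.empty)
    else (PySem.Dict.empty, PySem.Dict.empty)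
  let win := wp.1
  let plus1 := wp.2
  let res := (pvTop win top_window ++ pvTop plus1 top_plus1).foldl
    (fun (st : List Int × PySem.Set Int) (p : Int × Int) =>
      if PySem.Set.contains st.2 p.1 then st else (st.1 ++ [p.1], PySem.Set.add st.2 p.1))
    ([], PySem.Set.empty)
  (res.1, win.items, plus1.items)

-- ===== PRECONDITION & SPEC =====
-- Pre_ excludes window < 0 (a window LENGTH): there A's slice stop i+1+window can become
-- negative and Python wraps it around to the end of the list, counting an accidental segment.
def Pre_build_prediction_from_history (history_seq : List Int) (target : Int) (window : Int) (top_window : Int) (top_plus1 : Int) : Prop := 0 ≤ window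
instance (history_seq : List Int) (target : Int) (window : Int) (top_window : Int) (top_plus1 : Int) : Decidable (Pre_build_prediction_from_history history_seq target window top_window top_plus1) := by unfold Pre_build_prediction_from_history; infer_instance

def pvWitness_build_prediction_from_history : List Int × Int × Int × Int × Int := ([1, 2, 1, 3, 2], 1, 2, 2, 1)

def Spec_build_prediction_from_history (history_seq : List Int) (target : Int) (window : Int) (top_window : Int) (top_plus1 : Int) (out : List Int × (List (Int × Int)) × (List (Int × Int))) : Prop := out = build_prediction_from_history_alt history_seq target window top_window top_plus1
instance (history_seq : List Int) (target : Int) (window : Int) (top_window : Int) (top_plus1 : Int) (out : List Int × (List (Int × Int)) × (List (Int × Int))) : Decidable (Spec_build_prediction_from_history history_seq target window top_window top_plus1 out) := by unfold Spec_build_prediction_from_history; infer_instance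

-- ===== CLAIM (what is proved, stated in full; the proofs are below) =====
def Claim_equal_build_prediction_from_history : Prop := ∀ (history_seq : List Int) (target : Int) (window : Int) (top_window : Int) (top_plus1 : Int), Dom_build_prediction_from_history history_seq target window top_window top_plus1 → Pre_build_prediction_from_history history_seq target window top_window top_plus1 → Spec_build_prediction_from_history history_seq target window top_window top_plus1 (build_prediction_from_history history_seq target window top_window top_plus1)

-- ===== LEMMAS AND PROOFS =====

-- The multiset of window contents collected by A, as a structural recursion on the list.
def pvLA (t : Int) (w : Nat) : List Int → List Int
  | [] => []
  | x :: xs => (if x = t then xs.take w else []) ++ pvLA t w xs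

-- Number of target occurrences whose window covers position j (for j ≥ 1).
def pvC (t : Int) (w : Nat) (h : List Int) (j : Nat) : Nat :=
  ((h.drop (j - w)).take (min j w)).count t

-- The same multiset ordered by position, as collected by B.
def pvLB (t : Int) (w : Nat) (h : List Int) : List Int :=
  (List.range h.length).flatMap (fun j => List.replicate (pvC t w h j) (h.getD j 0))

-- Covered-position values, one per position, in position order.
def pvVB (t : Int) (w : Nat) (h : List Int) : List Int :=
  (((List.range h.length).filter (fun j => pvC t w h j ≠ 0)).map (fun j => h.getD j 0))

theorem pvC_zero (t : Int) (w : Nat) (h : List Int) : pvC t w h 0 = 0 := by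
  simp [pvC]

theorem pvC_cons (t x : Int) (w : Nat) (xs : List Int) (j : Nat) :
    pvC t w (x :: xs) (j + 1) = pvC t w xs j + (if x = t ∧ j < w then 1 else 0) := by
  by_cases hj : j < w
  · have h1 : j + 1 - w = 0 := by omega
    have h2 : j - w = 0 := by omega
    have h3 : min (j + 1) w = j + 1 := by omega
    have h4 : min j w = j := by omega
    simp only [pvC, h1, h2, h3, h4, List.drop_zero, List.take_succ_cons, List.count_cons]
    by_cases hx : x = t <;> simp [hx, hj, Nat.add_comm]
  · have h1 : j + 1 - w = (j - w) + 1 := by omega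
    have h3 : min (j + 1) w = min j w := by omega
    simp [pvC, h1, h3, hj]

theorem pvLA_zero (t : Int) (h : List Int) : pvLA t 0 h = [] := by
  induction h with
  | nil => rfl
  | cons x xs ih => simp [pvLA, ih]

-- ---- counts agree ----
theorem pv_count_take (xs : List Int) (w : Nat) (k : Int) :
    ((xs.take w).count k) = ((List.range xs.length).map (fun j => if j < w ∧ xs.getD j 0 = k then 1 else 0)).sum := by
  induction xs generalizing w with
  | nil => simp
  | cons x xs ih =>
    cases w with
    | zero => simp
    | succ w =>
      simp only [List.take_succ_cons, List.count_cons, List.length_cons, List.range_succ_eq_map,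
        List.map_cons, List.map_map, List.sum_cons]
      rw [ih w]
      have : ∀ j : Nat, ((fun j => if j < w + 1 ∧ (x :: xs).getD j 0 = k then 1 else 0) ∘ Nat.succ) j
          = (fun j => if j < w ∧ xs.getD j 0 = k then 1 else 0) j := by
        intro j; simp only [Function.comp, Nat.succ_lt_succ_iff, List.getD_cons_succ]
      rw [List.map_congr_left (fun j _ => this j)]
      by_cases hx : x = k <;> simp [hx, Nat.add_comm]

theorem pv_count_LB (t : Int) (w : Nat) (h : List Int) (k : Int) :
    (pvLB t w h).count k = ((List.range h.length).map (fun j => if h.getD j 0 = k then pvC t w h j else 0)).sum := by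
  rw [pvLB, List.count_flatMap]
  apply congrArg
  apply List.map_congr_left
  intro j _
  simp only [Function.comp, List.count_replicate]
  by_cases hx : h.getD j 0 = k <;> simp [hx]

theorem pv_count_eq (t : Int) (w : Nat) (h : List Int) (k : Int) :
    (pvLA t w h).count k = (pvLB t w h).count k := by
  induction h with
  | nil => simp [pvLA, pvLB]
  | cons x xs ih =>
    rw [pv_count_LB, pvLA, List.count_append, ih, pv_count_LB]
    simp only [List.length_cons, List.range_succ_eq_map, List.map_cons, List.map_map,
      List.sum_cons, pvC_zero, List.getD_cons_zero]
    have hpt : ∀ j : Nat,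
        ((fun j => if (x :: xs).getD j 0 = k then pvC t w (x :: xs) j else 0) ∘ Nat.succ) j
        = (fun j => if xs.getD j 0 = k then pvC t w xs j else 0) j
          + (fun j => if x = t then (if j < w ∧ xs.getD j 0 = k then 1 else 0) else 0) j := by
      intro j
      simp only [Function.comp, List.getD_cons_succ, pvC_cons]
      by_cases hg : xs.getD j 0 = k <;> by_cases hx : x = t <;> by_cases hj : j < w <;>
        simp only [List.getD_eq_getElem?_getD] at hg ⊢ <;> simp [hg, hx, hj]
    rw [List.map_congr_left (fun j _ => hpt j), List.sum_map_add]
    by_cases hx : x = t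
    · rw [if_pos hx, pv_count_take]
      simp [hx, Nat.add_comm]
    · rw [if_neg hx]
      simp [hx]

-- ---- first-occurrence sets agree ----
theorem pv_update_eq (B s : List Int) :
    PySem.Set.update s B = s ++ (PySem.Set.ofList B).filter (fun v => !s.contains v) := by
  induction B generalizing s with
  | nil => simp [PySem.Set.update, PySem.Set.ofList, PySem.Set.empty]
  | cons v B ih =>
    have hof : PySem.Set.ofList (v :: B) = [v] ++ (PySem.Set.ofList B).filter (fun u => !([v].contains u)) := by
      have h0 : PySem.Set.ofList (v :: B) = PySem.Set.update [v] B := by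
        simp [PySem.Set.ofList, PySem.Set.update, PySem.Set.add, PySem.Set.contains, PySem.Set.empty]
      rw [h0, ih]
    have hupd : PySem.Set.update s (v :: B) = PySem.Set.update (PySem.Set.add s v) B := by
      simp [PySem.Set.update]
    rw [hupd, ih, hof]
    by_cases hv : s.contains v = true
    <;> [have hv' : v ∈ s := List.contains_iff_mem.mp hv;
         have hv' : v ∉ s := fun hm => hv (List.contains_iff_mem.mpr hm)]
    · have hadd : PySem.Set.add s v = s := by simp [PySem.Set.add, PySem.Set.contains, hv, hv']
      rw [hadd, List.filter_append, List.filter_filter]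
      have h1 : List.filter (fun u => !s.contains u) [v] = [] := by simp [hv, hv']
      rw [h1, List.nil_append]
      apply congrArg
      apply List.filter_congr
      intro u _
      cases hc : s.contains u with
      | true => simp
      | false =>
        have huv : ¬ (u = v) := by
          intro he; rw [he, hv] at hc; cases hc
        simp [huv]
    · have hadd : PySem.Set.add s v = s ++ [v] := by simp [PySem.Set.add, PySem.Set.contains, hv, hv']
      rw [hadd, List.filter_append, List.filter_filter]
      have h1 : List.filter (fun u => !s.contains u) [v] = [v] := by simp [hv, hv']
      rw [h1, List.append_assoc]
      apply congrArg; apply congrArg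
      apply List.filter_congr
      intro u _
      simp [Bool.and_comm]

theorem pv_ofList_append (A B : List Int) :
    PySem.Set.ofList (A ++ B) = PySem.Set.update (PySem.Set.ofList A) B := by
  simp [PySem.Set.ofList, PySem.Set.update, List.foldl_append]


theorem pv_update_append (s A B : List Int) :
    PySem.Set.update s (A ++ B) = PySem.Set.update (PySem.Set.update s A) B := by
  simp [PySem.Set.update, List.foldl_append]

theorem pv_add_mem (s : List Int) (v : Int) (h : v ∈ s) : PySem.Set.add s v = s := by
  simp [PySem.Set.add, PySem.Set.contains, h]

theorem pv_update_mem (s : List Int) (v : Int) (m : Nat) (h : v ∈ s) :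
    PySem.Set.update s (List.replicate m v) = s := by
  induction m with
  | zero => rfl
  | succ m ih =>
    have : PySem.Set.update s (List.replicate (m + 1) v)
        = PySem.Set.update (PySem.Set.add s v) (List.replicate m v) := by
      simp [PySem.Set.update, List.replicate_succ]
    rw [this, pv_add_mem s v h, ih]

theorem pv_update_rep (s : List Int) (v : Int) (m : Nat) :
    PySem.Set.update s (List.replicate m v) = if m = 0 then s else PySem.Set.add s v := by
  cases m with
  | zero => rfl
  | succ m =>
    have : PySem.Set.update s (List.replicate (m + 1) v)
        = PySem.Set.update (PySem.Set.add s v) (List.replicate m v) := by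
      simp [PySem.Set.update, List.replicate_succ]
    rw [this, pv_update_mem _ _ _ (by simp [PySem.Set.mem_add])]
    simp

theorem pv_update_cons (s : List Int) (v : Int) (l : List Int) :
    PySem.Set.update s (v :: l) = PySem.Set.update (PySem.Set.add s v) l := by
  simp [PySem.Set.update]

theorem pv_upd_flat (js : List Nat) (c : Nat → Nat) (g : Nat → Int) (s : List Int) :
    PySem.Set.update s (js.flatMap (fun j => List.replicate (c j) (g j)))
      = PySem.Set.update s ((js.filter (fun j => c j ≠ 0)).map g) := by
  induction js generalizing s with
  | nil => rfl
  | cons j js ih =>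
    rw [List.flatMap_cons, pv_update_append, pv_update_rep, List.filter_cons]
    by_cases hc : c j = 0
    · rw [if_pos hc, if_neg (by simp [hc])]
      exact ih s
    · rw [if_neg hc, if_pos (by simp [hc]), List.map_cons, pv_update_cons]
      exact ih _

theorem pv_update_congr (s l₁ l₂ : List Int) (h : PySem.Set.ofList l₁ = PySem.Set.ofList l₂) :
    PySem.Set.update s l₁ = PySem.Set.update s l₂ := by
  rw [pv_update_eq, pv_update_eq, h]

theorem pv_update_id (s l : List Int) (h : ∀ v ∈ l, v ∈ s) : PySem.Set.update s l = s := by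
  rw [pv_update_eq]
  have : (PySem.Set.ofList l).filter (fun v => !s.contains v) = [] := by
    apply List.filter_eq_nil_iff.mpr
    intro v hv
    have : v ∈ l := (PySem.Set.mem_ofList l v).mp hv
    simp [h v this]
  rw [this, List.append_nil]

theorem pv_ofList_eq_update (l : List Int) : PySem.Set.ofList l = PySem.Set.update [] l := by
  rfl

theorem pv_take_eq_map (xs : List Int) (w : Nat) :
    xs.take w = (List.range (min w xs.length)).map (fun j => xs.getD j 0) := by
  apply List.ext_getElem
  · simp
  · intro i h1 h2
    have hi : i < xs.length := by simp at h1; omega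
    simp only [List.getElem_take, List.getElem_map, List.getElem_range]
    rw [List.getD_eq_getElem _ _ hi]

theorem pv_set_LB_VB (t : Int) (w : Nat) (h : List Int) :
    PySem.Set.ofList (pvLB t w h) = PySem.Set.ofList (pvVB t w h) := by
  rw [pv_ofList_eq_update, pv_ofList_eq_update, pvLB, pvVB]
  exact pv_upd_flat _ _ _ _

theorem pv_set_eq (t : Int) (w : Nat) (h : List Int) :
    PySem.Set.ofList (pvLA t w h) = PySem.Set.ofList (pvVB t w h) := by
  induction h with
  | nil => rfl
  | cons x xs ih =>
    have hVB : pvVB t w (x :: xs)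
        = ((List.range xs.length).filter (fun j => decide (pvC t w (x :: xs) (j + 1) ≠ 0))).map
            (fun j => xs.getD j 0) := by
      rw [pvVB, List.length_cons, List.range_succ_eq_map, List.filter_cons]
      rw [if_neg (by simp [pvC_zero])]
      simp only [List.filter_map, List.map_map, Function.comp]
      apply List.map_congr_left
      intro j _
      simp
    by_cases hx : x = t
    · have hcond : ∀ j, decide (pvC t w (x :: xs) (j + 1) ≠ 0)
          = (decide (j < w) || decide (pvC t w xs j ≠ 0)) := by
        intro j
        rw [pvC_cons]
        by_cases hj : j < w <;> simp [hx, hj]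
      have hsplit : List.range xs.length
          = List.range (min w xs.length) ++ (List.range (xs.length - min w xs.length)).map (min w xs.length + ·) := by
        rw [← List.range_add]
        congr 1
        omega
      have htake : xs.take w = (List.range (min w xs.length)).map (fun j => xs.getD j 0) :=
        pv_take_eq_map xs w
      have hB : PySem.Set.ofList (pvVB t w (x :: xs))
          = PySem.Set.update (PySem.Set.ofList (xs.take w))
              ((((List.range (xs.length - min w xs.length)).map (min w xs.length + ·)).filter
                  (fun j => decide (pvC t w xs j ≠ 0))).map (fun j => xs.getD j 0)) := by
        rw [hVB, List.filter_congr (fun j _ => hcond j), hsplit, List.filter_append, List.map_append]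
        have h1 : (List.range (min w xs.length)).filter
            (fun j => decide (j < w) || decide (pvC t w xs j ≠ 0)) = List.range (min w xs.length) := by
          apply List.filter_eq_self.mpr
          intro j hj
          have hjw : j < w := by have := List.mem_range.mp hj; omega
          simp [hjw]
        have h2 : ((List.range (xs.length - min w xs.length)).map (min w xs.length + ·)).filter
              (fun j => decide (j < w) || decide (pvC t w xs j ≠ 0))
            = ((List.range (xs.length - min w xs.length)).map (min w xs.length + ·)).filter
              (fun j => decide (pvC t w xs j ≠ 0)) := by
          apply List.filter_congr
          intro j hj
          obtain ⟨k, hk, rfl⟩ := List.mem_map.mp hj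
          have hk' := List.mem_range.mp hk
          have hnk : ¬ (min w xs.length + k < w) := by omega
          simp [hnk]
        rw [h1, h2, ← htake, pv_ofList_append]
      rw [pvLA, if_pos hx, pv_ofList_append, pv_update_congr _ _ _ ih, hB]
      rw [pvVB, hsplit, List.filter_append, List.map_append, pv_update_append]
      congr 1
      apply pv_update_id
      intro v hv
      obtain ⟨j, hj, rfl⟩ := List.mem_map.mp hv
      have hj' : j ∈ List.range (min w xs.length) := List.mem_of_mem_filter hj
      exact (PySem.Set.mem_ofList _ _).mpr (htake ▸ List.mem_map_of_mem hj')
    · have hcond : ∀ j, decide (pvC t w (x :: xs) (j + 1) ≠ 0) = decide (pvC t w xs j ≠ 0) := by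
        intro j
        rw [pvC_cons]
        simp [hx]
      rw [pvLA, if_neg hx, List.nil_append, ih, hVB, List.filter_congr (fun j _ => hcond j), pvVB]

-- ---- grand counter equality ----
theorem pv_grand (t : Int) (w : Nat) (h : List Int) :
    PySem.Dict.counter (pvLA t w h) = PySem.Dict.counter (pvLB t w h) := by
  apply PySem.Dict.ext
  rw [PySem.Dict.items_counter, PySem.Dict.items_counter, pv_set_eq, ← pv_set_LB_VB]
  exact List.map_congr_left (fun k _ => by rw [pv_count_eq])

-- ---- A's folds compute counters of pvLA ----
theorem pv_enum_cons (x : Int) (xs : List Int) (s : Int) :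
    PySem.List.enumerate (x :: xs) s = (s, x) :: PySem.List.enumerate xs (s + 1) := by
  simp [PySem.List.enumerate]

theorem pv_lemA (t : Int) (H : List Int) (W : Nat) :
    ∀ (xs : List Int) (s : Nat), H.drop s = xs →
    (PySem.List.enumerate xs (s : Int)).flatMap
      (fun p => if p.2 ≠ t then [] else (H.drop (p.1 + 1).toNat).take W)
    = pvLA t W xs := by
  intro xs
  induction xs with
  | nil =>
    intro s _
    simp [PySem.List.enumerate, pvLA]
  | cons x xs ih =>
    intro s hs
    rw [pv_enum_cons, List.flatMap_cons]
    have hd : H.drop (s + 1) = xs := by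
      rw [← List.drop_drop, hs]
      rfl
    have hcast : ((s : Int) + 1) = ((s + 1 : Nat) : Int) := by push_cast; ring
    rw [pvLA]
    congr 1
    · have h1 : (((s : Int) + 1)).toNat = s + 1 := by omega
      rw [h1, hd]
      by_cases hx : x = t
      · rw [if_neg (by simp [hx]), if_pos hx]
      · rw [if_pos hx, if_neg hx]
    · rw [hcast]
      exact ih (s + 1) hd

theorem pv_fst_enum_nonneg (h : List Int) (p : Int × Int) (hp : p ∈ PySem.List.enumerate h 0) :
    0 ≤ p.1 := by
  have h1 : p.1 ∈ (PySem.List.enumerate h 0).map (·.1) := List.mem_map_of_mem hp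
  rw [PySem.List.map_fst_enumerate] at h1
  have h2 := PySem.List.mem_pyRange_one.mp h1
  omega

theorem pv_A_win' (t wI : Int) (hw : 0 ≤ wI) (h : List Int) :
    ((PySem.List.enumerate h 0).foldl
      (fun (d : PySem.Dict Int Int) (p : Int × Int) => if p.2 ≠ t then d else
        (PySem.List.slice h (some (p.1 + 1)) (some (p.1 + 1 + wI))).foldl
          (fun d x => d.modify x 0 (· + 1)) d)
      PySem.Dict.empty) = PySem.Dict.counter (pvLA t wI.toNat h) := by
  rw [PySem.Dict.counter_eq_foldl, ← pv_lemA t h wI.toNat h 0 (by rfl), List.foldl_flatMap]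
  apply PySem.List.foldl_congr_mem
  intro d p hp
  have h0 : 0 ≤ p.1 := pv_fst_enum_nonneg h p hp
  by_cases hpt : p.2 ≠ t
  · rw [if_pos hpt, if_pos hpt]
    rfl
  · rw [if_neg hpt, if_neg hpt]
    rw [PySem.List.slice_toNat h (by omega) (by omega)]
    congr 2
    omega

theorem pv_A_plus1' (t wI : Int) (hw : 0 ≤ wI) (h : List Int) :
    ((PySem.List.enumerate h 0).foldl
      (fun (d : PySem.Dict Int Int) (p : Int × Int) => if p.2 ≠ t then d else
        match PySem.List.slice h (some (p.1 + 1)) (some (p.1 + 1 + wI)) with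
        | [] => d
        | a :: _ => d.modify a 0 (· + 1))
      PySem.Dict.empty) = PySem.Dict.counter (pvLA t (min wI.toNat 1) h) := by
  rw [PySem.Dict.counter_eq_foldl, ← pv_lemA t h (min wI.toNat 1) h 0 (by rfl), List.foldl_flatMap]
  apply PySem.List.foldl_congr_mem
  intro d p hp
  have h0 : 0 ≤ p.1 := pv_fst_enum_nonneg h p hp
  by_cases hpt : p.2 ≠ t
  · rw [if_pos hpt, if_pos hpt]
    rfl
  · rw [if_neg hpt, if_neg hpt]
    rw [PySem.List.slice_toNat h (by omega) (by omega)]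
    have harg : (p.1 + 1 + wI).toNat - (p.1 + 1).toNat = wI.toNat := by omega
    rw [harg]
    have htt : (List.take (min wI.toNat 1) (List.drop (p.1 + 1).toNat h))
        = List.take 1 (List.take wI.toNat (List.drop (p.1 + 1).toNat h)) := by
      rw [List.take_take, Nat.min_comm]
    rw [htt]
    cases List.take wI.toNat (List.drop (p.1 + 1).toNat h) with
    | nil => rfl
    | cons a rest => rfl

theorem pv_A_win (t wI : Int) (hw : 0 ≤ wI) (h : List Int) :
    ((PySem.List.enumerate h 0).foldl
      (fun (d : PySem.Dict Int Int) (p : Int × Int) => if p.2 ≠ t then d else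
        (PySem.List.slice h (some (p.1 + 1)) (some (p.1 + 1 + wI))).foldl
          (fun d x => d.modify x 0 (· + 1)) d)
      PySem.Dict.empty) = PySem.Dict.counter (pvLA t wI.toNat h) := pv_A_win' t wI hw h

theorem pv_A_plus1 (t wI : Int) (hw : 0 ≤ wI) (h : List Int) :
    ((PySem.List.enumerate h 0).foldl
      (fun (d : PySem.Dict Int Int) (p : Int × Int) => if p.2 ≠ t then d else
        match PySem.List.slice h (some (p.1 + 1)) (some (p.1 + 1 + wI)) with
        | [] => d
        | a :: _ => d.modify a 0 (· + 1))
      PySem.Dict.empty) = PySem.Dict.counter (pvLA t (min wI.toNat 1) h) := pv_A_plus1' t wI hw h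

-- ---- B's folds compute counters of pvLB ----
theorem pv_dict_rep (m : Nat) (v : Int) (d : PySem.Dict Int Int) :
    (List.replicate m v).foldl (fun d x => d.insert x (d.getD x 0 + 1)) d
      = if m = 0 then d else d.insert v (d.getD v 0 + (m : Int)) := by
  induction m generalizing d with
  | zero => rfl
  | succ m ih =>
    rw [List.replicate_succ, List.foldl_cons, ih]
    by_cases hm : m = 0
    · subst hm
      simp
    · rw [if_neg hm, if_neg (Nat.succ_ne_zero m)]
      rw [PySem.Dict.getD_insert_self, PySem.Dict.insert_insert_self]
      congr 1
      push_cast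
      ring

theorem pv_prefix (t : Int) : ∀ (l acc : List Int) (a : Int),
    l.foldl (fun acc v => acc ++ [PySem.List.pyGetD acc (-1) 0 + (if v = t then 1 else 0)]) (acc ++ [a])
    = acc ++ [a] ++ (List.range l.length).map (fun j => a + ((l.take (j+1)).count t : Int)) := by
  intro l
  induction l with
  | nil => intro acc a; simp
  | cons v l ih =>
    intro acc a
    rw [List.foldl_cons, PySem.List.pyGetD_neg_one_append_singleton,
      ih (acc ++ [a]) (a + (if v = t then 1 else 0))]
    rw [List.length_cons, List.range_succ_eq_map, List.map_cons, List.map_map]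
    simp only [List.append_assoc, List.cons_append, List.nil_append]
    have hstep : ∀ (P Q : List Int) (u v : Int), u = v → P = Q →
        acc ++ a :: u :: P = acc ++ a :: v :: Q := by
      intro P Q u v h1 h2
      rw [h1, h2]
    apply hstep
    · by_cases hv : v = t <;> simp [hv]
    · apply List.map_congr_left
      intro j _
      simp only [Function.comp, List.take_succ_cons, List.count_cons]
      by_cases hv : v = t <;> simp [hv] <;> ring

theorem pv_active (t : Int) (w : Nat) (h : List Int) (j : Nat) :
    ((h.take j).count t : Int) - ((h.take (j - w)).count t : Int) = (pvC t w h j : Int) := by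
  have key : h.take j = h.take (j - w) ++ (h.drop (j - w)).take (min j w) := by
    conv_lhs => rw [show j = (j - w) + min j w from by omega]
    rw [List.take_add]
  rw [key, List.count_append, pvC]
  push_cast
  ring

theorem pv_c_one (t : Int) (h : List Int) (k : Nat) (hk : k < h.length) :
    pvC t 1 h (k + 1) = if h.getD k 0 = t then 1 else 0 := by
  rw [pvC]
  have h1 : k + 1 - 1 = k := rfl
  have h2 : min (k + 1) 1 = 1 := by omega
  rw [h1, h2]
  have hd : h.drop k = h.getD k 0 :: h.drop (k + 1) := by
    rw [List.getD_eq_getElem _ _ hk]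
    exact List.drop_eq_getElem_cons hk
  rw [hd]
  by_cases hv : h.getD k 0 = t <;> simp [List.count_cons, hv]

-- prefix list characterisation

theorem pv_prefix_eq (t : Int) (h : List Int) :
    h.foldl (fun acc v => acc ++ [PySem.List.pyGetD acc (-1) 0 + (if v = t then 1 else 0)]) [(0 : Int)]
    = (List.range (h.length + 1)).map (fun j => ((h.take j).count t : Int)) := by
  have := pv_prefix t h [] 0
  simp only [List.nil_append] at this
  rw [this, List.range_succ_eq_map, List.map_cons, List.map_map, List.singleton_append]
  congr 1
  simp [Function.comp]

theorem pv_getP (t : Int) (h : List Int) (j : Nat) (hj : j < h.length + 1) :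
    PySem.List.pyGetD ((List.range (h.length + 1)).map (fun j => ((h.take j).count t : Int))) ((j : Nat) : Int) 0
    = ((h.take j).count t : Int) := by
  rw [PySem.List.pyGetD_natCast]
  rw [List.getD_eq_getElem _ _ (by simpa using hj)]
  simp

theorem pv_B_win (t wI : Int) (hw : 0 < wI) (h : List Int) :
    ((PySem.List.pyRange 1 (PySem.List.len h) 1).foldl
      (fun (d : PySem.Dict Int Int) (j : Int) =>
        let prefx := h.foldl (fun acc v => acc ++ [PySem.List.pyGetD acc (-1) 0 + (if v = t then 1 else 0)]) [(0 : Int)]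
        let active := PySem.List.pyGetD prefx j 0 - PySem.List.pyGetD prefx (max 0 (j - wI)) 0
        if active ≠ 0 then
          d.insert (PySem.List.pyGetD h j 0) (d.getD (PySem.List.pyGetD h j 0) 0 + active)
        else d)
      PySem.Dict.empty) = PySem.Dict.counter (pvLB t wI.toNat h) := by
  rw [← PySem.Dict.foldl_insert_getD_add_one_eq_counter, pvLB, List.foldl_flatMap]
  -- rewrite inner replicate folds
  have hmid : (List.range h.length).foldl
      (fun (acc : PySem.Dict Int Int) (x : Nat) =>
        (List.replicate (pvC t wI.toNat h x) (h.getD x 0)).foldl (fun d x => d.insert x (d.getD x 0 + 1)) acc)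
      PySem.Dict.empty
      = (List.range h.length).foldl
      (fun (d : PySem.Dict Int Int) (j : Nat) =>
        if pvC t wI.toNat h j = 0 then d
        else d.insert (h.getD j 0) (d.getD (h.getD j 0) 0 + (pvC t wI.toNat h j : Int)))
      PySem.Dict.empty :=
    PySem.List.foldl_congr_mem _ _ _ _ (fun d j _ => pv_dict_rep _ _ _)
  rw [hmid]
  -- LHS: convert pyRange fold to Nat range fold
  have hlen : PySem.List.len h = (h.length : Int) := PySem.List.len_eq h
  rw [hlen, PySem.List.pyRange_one, List.foldl_map]
  have hn1 : ((h.length : Int) - 1).toNat = h.length - 1 := by omega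
  rw [hn1]
  by_cases hn : h.length = 0
  · rw [hn]
    rfl
  · conv_rhs => rw [show h.length = (h.length - 1) + 1 from by omega, List.range_succ_eq_map]
    rw [List.foldl_cons, if_pos (pvC_zero t wI.toNat h), List.foldl_map]
    apply PySem.List.foldl_congr_mem
    intro d k hk
    have hk' : k + 1 < h.length + 1 := by
      have := List.mem_range.mp hk
      omega
    simp only [pv_prefix_eq t h]
    have hc1 : (1 : Int) + (k : Int) = ((k + 1 : Nat) : Int) := by push_cast; ring
    have hmax : max 0 (((k + 1 : Nat) : Int) - wI) = (((k + 1) - wI.toNat : Nat) : Int) := by omega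
    rw [hc1, hmax, pv_getP t h (k + 1) hk', pv_getP t h ((k + 1) - wI.toNat) (by omega)]
    rw [pv_active t wI.toNat h (k + 1)]
    rw [PySem.List.pyGetD_natCast]
    by_cases hz : pvC t wI.toNat h (k + 1) = 0
    · rw [if_neg (by simp [hz]), if_pos hz]
    · rw [if_pos (by simpa using hz), if_neg hz]

theorem pv_B_plus1 (t : Int) (h : List Int) :
    ((PySem.List.pyRange 1 (PySem.List.len h) 1).foldl
      (fun (d : PySem.Dict Int Int) (j : Int) =>
        if PySem.List.pyGetD h (j - 1) 0 = t then
          d.insert (PySem.List.pyGetD h j 0) (d.getD (PySem.List.pyGetD h j 0) 0 + 1)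
        else d)
      PySem.Dict.empty) = PySem.Dict.counter (pvLB t 1 h) := by
  rw [← PySem.Dict.foldl_insert_getD_add_one_eq_counter, pvLB, List.foldl_flatMap]
  have hmid : (List.range h.length).foldl
      (fun (acc : PySem.Dict Int Int) (x : Nat) =>
        (List.replicate (pvC t 1 h x) (h.getD x 0)).foldl (fun d x => d.insert x (d.getD x 0 + 1)) acc)
      PySem.Dict.empty
      = (List.range h.length).foldl
      (fun (d : PySem.Dict Int Int) (j : Nat) =>
        if pvC t 1 h j = 0 then d
        else d.insert (h.getD j 0) (d.getD (h.getD j 0) 0 + (pvC t 1 h j : Int)))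
      PySem.Dict.empty :=
    PySem.List.foldl_congr_mem _ _ _ _ (fun d j _ => pv_dict_rep _ _ _)
  rw [hmid]
  have hlen : PySem.List.len h = (h.length : Int) := PySem.List.len_eq h
  rw [hlen, PySem.List.pyRange_one, List.foldl_map]
  have hn1 : ((h.length : Int) - 1).toNat = h.length - 1 := by omega
  rw [hn1]
  by_cases hn : h.length = 0
  · rw [hn]
    rfl
  · conv_rhs => rw [show h.length = (h.length - 1) + 1 from by omega, List.range_succ_eq_map]
    rw [List.foldl_cons, if_pos (pvC_zero t 1 h), List.foldl_map]
    apply PySem.List.foldl_congr_mem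
    intro d k hk
    have hkl : k < h.length := by
      have := List.mem_range.mp hk
      omega
    have hc0 : (1 : Int) + (k : Int) - 1 = ((k : Nat) : Int) := by ring
    have hc1 : (1 : Int) + (k : Int) = ((k + 1 : Nat) : Int) := by push_cast; ring
    rw [hc0, hc1, PySem.List.pyGetD_natCast, PySem.List.pyGetD_natCast]
    rw [pv_c_one t h k hkl]
    simp only [List.getD_eq_getElem?_getD]
    by_cases hv : h[k]?.getD 0 = t
    · rw [if_pos hv, if_neg (by simp [hv])]
      simp [hv]
    · rw [if_neg hv, if_pos (by simp [hv])]

-- ---- suggestion loops agree ----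
theorem pv_sugg (l : List (Int × Int)) (acc : List Int) :
    (l.foldl (fun (st : List Int × PySem.Set Int) (p : Int × Int) =>
        if PySem.Set.contains st.2 p.1 then st else (st.1 ++ [p.1], PySem.Set.add st.2 p.1))
      (acc, acc))
    = (l.foldl (fun acc p => if acc.contains p.1 then acc else acc ++ [p.1]) acc,
       l.foldl (fun acc p => if acc.contains p.1 then acc else acc ++ [p.1]) acc) := by
  induction l generalizing acc with
  | nil => rfl
  | cons p l ih =>
    rw [List.foldl_cons, List.foldl_cons]
    by_cases hc : acc.contains p.1 = true
    · have h1 : (if PySem.Set.contains (acc, acc).2 p.1 = true then ((acc, acc) : List Int × PySem.Set Int)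
          else ((acc, acc).1 ++ [p.1], PySem.Set.add (acc, acc).2 p.1)) = (acc, acc) := by
        simp [PySem.Set.contains, List.contains_iff_mem.mp hc]
      rw [h1, if_pos hc]
      exact ih acc
    · have h1 : (if PySem.Set.contains (acc, acc).2 p.1 = true then ((acc, acc) : List Int × PySem.Set Int)
          else ((acc, acc).1 ++ [p.1], PySem.Set.add (acc, acc).2 p.1)) = (acc ++ [p.1], acc ++ [p.1]) := by
        have hm : ¬ p.1 ∈ acc := fun hm => hc (List.contains_iff_mem.mpr hm)
        simp [PySem.Set.contains, PySem.Set.add, hm]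
      rw [h1, if_neg hc]
      exact ih (acc ++ [p.1])

theorem pv_A_plus1h (t wI : Int) (hw : 0 ≤ wI) (h : List Int) :
    List.foldl (pvAplus1step h t wI) PySem.Dict.empty (PySem.List.enumerate h 0)
      = PySem.Dict.counter (pvLA t (min wI.toNat 1) h) := pv_A_plus1 t wI hw h

theorem pv_A_winh (t wI : Int) (hw : 0 ≤ wI) (h : List Int) :
    List.foldl (pvAwinstep h t wI) PySem.Dict.empty (PySem.List.enumerate h 0)
      = PySem.Dict.counter (pvLA t wI.toNat h) := pv_A_win t wI hw h

theorem pv_B_winh (t wI : Int) (hw : 0 < wI) (h : List Int) :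
    List.foldl (pvBwinstep h
        (h.foldl (fun acc v => acc ++ [PySem.List.pyGetD acc (-1) 0 + (if v = t then 1 else 0)]) [(0 : Int)])
        t wI)
      PySem.Dict.empty (PySem.List.pyRange 1 (PySem.List.len h) 1)
      = PySem.Dict.counter (pvLB t wI.toNat h) := pv_B_win t wI hw h

theorem pv_B_plus1h (t : Int) (h : List Int) :
    List.foldl (pvBplus1step h t) PySem.Dict.empty (PySem.List.pyRange 1 (PySem.List.len h) 1)
      = PySem.Dict.counter (pvLB t 1 h) := pv_B_plus1 t h

theorem pv_top_empty (k : Int) : pvTop PySem.Dict.empty k = [] := by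
  rw [pvTop]
  split_ifs
  · rfl
  · rw [show (PySem.Dict.empty : PySem.Dict Int Int).items = [] from rfl,
      (PySem.List.sorted_eq_nil_iff _ _ _).mpr rfl, List.take_nil]

-- ===== VERDICT (by name: the statement is the Claim_ definition above) =====
theorem build_prediction_from_history_spec : Claim_equal_build_prediction_from_history := by
  intro h t w tw tp _ hpre
  have hw0 : 0 ≤ w := hpre
  unfold Spec_build_prediction_from_history
  simp only [build_prediction_from_history, build_prediction_from_history_alt]
  rw [PySem.List.foldl_prod_mk (f := pvAplus1step h t w) (g := pvAwinstep h t w)]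
  rw [show pvMostCommon = pvTop from rfl]
  by_cases hwp : w > 0
  · rw [if_pos hwp]
    rw [PySem.List.foldl_prod_mk (f := pvBwinstep h _ t w) (g := pvBplus1step h t)]
    rw [pv_A_plus1h t w hw0 h, pv_A_winh t w hw0 h, pv_B_winh t w hwp h, pv_B_plus1h t h]
    have hmin : min w.toNat 1 = 1 := by omega
    rw [hmin, pv_grand t w.toNat h, pv_grand t 1 h]
    rw [List.foldl_append]
    rw [show (PySem.Set.empty : PySem.Set Int) = ([] : List Int) from rfl]
    rw [pv_sugg (pvTop (PySem.Dict.counter (pvLB t w.toNat h)) tw) []]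
    rw [pv_sugg (pvTop (PySem.Dict.counter (pvLB t 1 h)) tp) _]
  · rw [if_neg hwp]
    have hw00 : w.toNat = 0 := by omega
    rw [pv_A_plus1h t w hw0 h, pv_A_winh t w hw0 h, hw00]
    simp [pvLA_zero, pv_top_empty,
      show PySem.Dict.counter ([] : List Int) = PySem.Dict.empty from rfl]
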